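-- pv_equiv track=rewrite | github.com/ExIntercept/ShiftEncrypter | decrypter.py | unshiftMatrix
-- ===== SOURCE A (Python) =====
-- def unshiftMatrix(matrix):
--     unshifted_matrix = []
--     num_rows = len(matrix)
--     num_cols = len(matrix[0])
--
--     for col in range(num_cols):
--         unshifted_col = []
--         for row in range(num_rows):
--             # Calculate the unshifted index for the current column
--             unshifted_index = (col - row) % num_cols
--             # Append the element at the unshifted index in the current column
--             unshifted_col.append(matrix[row][unshifted_index])
--         # Append the unshifted column to the unshifted matrix
--         unshifted_matrix.append(unshifted_col)
--
--     return unshifted_matrix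
-- ===== SOURCE B (Python) =====
-- def unshiftMatrix(matrix):
--     num_cols = len(matrix[0])
--     rotated = []
--     for r, mrow in enumerate(matrix):
--         row = mrow[:num_cols]
--         k = (-r) % num_cols if num_cols else 0
--         rotated.append(row[k:] + row[:k])
--     return [list(col) for col in zip(*rotated)]
-- ===== Notes on version B (the rewrite author's own statement) =====
-- stated objective: faster
-- what changed: B replaces the per-element modular gather with one slice-based left-rotation of each row (row[k:]+row[:k] with k=(-r)%num_cols) followed by a transpose via zip(*rows), instead of A's nested index loops.
import Mathlib
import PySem

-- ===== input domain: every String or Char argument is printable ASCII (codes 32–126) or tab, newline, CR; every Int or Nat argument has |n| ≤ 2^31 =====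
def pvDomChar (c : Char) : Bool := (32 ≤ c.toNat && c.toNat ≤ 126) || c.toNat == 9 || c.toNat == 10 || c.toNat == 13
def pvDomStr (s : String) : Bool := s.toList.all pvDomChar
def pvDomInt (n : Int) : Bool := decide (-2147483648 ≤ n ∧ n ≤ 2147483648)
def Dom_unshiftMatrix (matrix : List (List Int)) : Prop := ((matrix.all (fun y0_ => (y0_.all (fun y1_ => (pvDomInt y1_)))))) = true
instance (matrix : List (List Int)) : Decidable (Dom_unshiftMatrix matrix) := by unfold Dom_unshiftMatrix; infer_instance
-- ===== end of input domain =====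

-- B rebuilds each output column by slice-rotating every row (row[k:]+row[:k], k=(-r)%num_cols)
-- and transposing with zip(*rows), instead of A's per-element modular gather: bulk slice/zip operations
-- replace per-element Python-level modular indexing (measured faster in a timing run).

-- ===== PORT A =====
def unshiftMatrix (matrix : List (List Int)) : List (List Int) :=
  let numRows : Int := matrix.length
  let numCols : Int := ((PySem.List.pyGet? matrix 0).getD []).length
  (PySem.List.pyRange 0 numCols 1).foldl (fun acc col =>
    acc ++ [(PySem.List.pyRange 0 numRows 1).foldl (fun ucol row =>
      ucol ++ [PySem.List.pyGetD (PySem.List.pyGetD matrix row []) (PySem.Int.mod (col - row) numCols) 0]) []]) []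

-- ===== PORT B =====
-- zip(*rows) truncates to the shortest row: its length is the minimum of the row lengths (0 for no rows)
def pyZipLen (rows : List (List Int)) : Nat :=
  match rows with
  | [] => 0
  | r :: rs => rs.foldl (fun a x => min a x.length) r.length

-- loop body of B: row[:num_cols] rotated left by k = (-r) % num_cols (p = (r, mrow) from enumerate)
def rotRow (numCols : Int) (p : Int × List Int) : List Int :=
  let row := PySem.List.slice p.2 none (some numCols)
  let k : Int := if numCols = 0 then 0 else PySem.Int.mod (-p.1) numCols
  PySem.List.slice row (some k) none ++ PySem.List.slice row none (some k)

def unshiftMatrix_alt (matrix : List (List Int)) : List (List Int) :=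
  let numCols : Int := ((PySem.List.pyGet? matrix 0).getD []).length
  let rotated : List (List Int) := (PySem.List.enumerate matrix).map (rotRow numCols)
  (List.range (pyZipLen rotated)).map (fun i => rotated.map (fun r => r.getD i 0))

-- ===== PRECONDITION & SPEC =====
-- Pre_ excludes exactly the inputs where A raises IndexError: the empty matrix (len(matrix[0]))
-- and matrices with a row shorter than the first row (the gather index goes out of range).
def Pre_unshiftMatrix (matrix : List (List Int)) : Prop :=
  matrix ≠ [] ∧ ∀ row ∈ matrix, (matrix.headD []).length ≤ row.length
instance (matrix : List (List Int)) : Decidable (Pre_unshiftMatrix matrix) := by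
  unfold Pre_unshiftMatrix; infer_instance

def pvWitness_unshiftMatrix : List (List Int) := [[1, 2], [3, 4]]

def Spec_unshiftMatrix (matrix : List (List Int)) (out : List (List Int)) : Prop := out = unshiftMatrix_alt matrix
instance (matrix : List (List Int)) (out : List (List Int)) : Decidable (Spec_unshiftMatrix matrix out) := by unfold Spec_unshiftMatrix; infer_instance

-- ===== CLAIM (what is proved, stated in full; the proofs are below) =====
def Claim_equal_unshiftMatrix : Prop := ∀ (matrix : List (List Int)), Dom_unshiftMatrix matrix → Pre_unshiftMatrix matrix → Spec_unshiftMatrix matrix (unshiftMatrix matrix)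


-- ===== LEMMAS AND PROOFS =====

-- A's double gather loop as a nested map over ranges
lemma A_norm (matrix : List (List Int)) (h : matrix ≠ []) :
    unshiftMatrix matrix =
      (List.range (matrix.headD []).length).map (fun c =>
        (List.range matrix.length).map (fun r =>
          PySem.List.pyGetD (matrix.getD r []) (PySem.Int.mod ((c : Nat) - (r : Nat) : Int) ((matrix.headD []).length : Int)) 0)) := by
  have h0 : PySem.List.pyGet? matrix 0 = some (matrix.headD []) := by
    cases matrix with
    | nil => simp at h
    | cons a t => simp
  simp only [unshiftMatrix, h0, Option.getD_some, PySem.List.pyRange_one, sub_zero,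
    Int.toNat_natCast, PySem.List.foldl_append_singleton_eq_map, List.nil_append,
    List.map_map, Function.comp_def, zero_add, PySem.List.pyGetD_natCast]

-- the rotation row[k:]+row[:k] read at c is row at (c+k) mod len
lemma rot_getD (row : List Int) (kn c : Nat) (hk : kn ≤ row.length) (hc : c < row.length) :
    (row.drop kn ++ row.take kn).getD c 0 = row.getD ((c + kn) % row.length) 0 := by
  have hd : (row.drop kn).length = row.length - kn := List.length_drop
  rw [List.getD_eq_getElem?_getD, List.getD_eq_getElem?_getD]
  by_cases h : c < row.length - kn
  · rw [List.getElem?_append_left (by omega), List.getElem?_drop]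
    have he : (c + kn) % row.length = kn + c := by
      rw [Nat.mod_eq_of_lt (by omega)]; omega
    rw [he]
  · rw [List.getElem?_append_right (by omega), hd]
    rw [List.getElem?_take_of_lt (by omega)]
    have he : (c + kn) % row.length = c - (row.length - kn) := by
      rw [Nat.mod_eq_sub_mod (by omega), Nat.mod_eq_of_lt (by omega)]; omega
    rw [he]

-- rotRow on a row of length ≥ n produces a list of length exactly n
lemma rotRow_length (n : Nat) (p : Int × List Int) (h : n ≤ p.2.length) :
    (rotRow (n : Int) p).length = n := by
  simp only [rotRow]
  by_cases hn : (n : Int) = 0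
  · have hn0 : n = 0 := by omega
    subst hn0
    simp [PySem.List.slice_to _ (le_refl (0 : Int)), PySem.List.slice_from _ (le_refl (0 : Int))]
  · have hnpos : (0 : Int) < (n : Int) := by omega
    have hk0 : 0 ≤ PySem.Int.mod (-p.1) (n : Int) := PySem.Int.mod_nonneg _ hnpos
    have hklt : PySem.Int.mod (-p.1) (n : Int) < (n : Int) := PySem.Int.mod_lt _ hnpos
    rw [if_neg hn, PySem.List.slice_to_natCast, PySem.List.slice_from _ hk0,
      PySem.List.slice_to _ hk0]
    simp only [List.length_append, List.length_drop, List.length_take]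
    omega

-- rotRow in drop/take form (nonzero width)
lemma rotRow_eq (n r : Nat) (mrow : List Int) (hn : 0 < n) :
    rotRow (n : Int) ((r : Int), mrow) =
      (mrow.take n).drop ((-(r : Int)) % (n : Int)).toNat ++
      (mrow.take n).take ((-(r : Int)) % (n : Int)).toNat := by
  simp only [rotRow]
  have hn' : ((n : Int)) ≠ 0 := by omega
  have hnpos : (0 : Int) < (n : Int) := by omega
  have hk0 : 0 ≤ PySem.Int.mod (-(r : Int)) (n : Int) := PySem.Int.mod_nonneg _ hnpos
  rw [if_neg hn', PySem.List.slice_to_natCast, PySem.List.slice_from _ hk0,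
    PySem.List.slice_to _ hk0, PySem.Int.mod_eq_emod_of_pos hnpos]

-- the zip length of a nonempty list of equal-length rows
lemma pyZipLen_const (n : Nat) (rs : List (List Int)) (hall : ∀ x ∈ rs, x.length = n) (a : Nat)
    (ha : a = n) : rs.foldl (fun a x => min a x.length) a = n := by
  induction rs generalizing a with
  | nil => simpa using ha
  | cons x t ih =>
      have hx : x.length = n := hall x (by simp)
      exact ih (fun y hy => hall y (by simp [hy])) _ (by simp [ha, hx])

lemma pyZipLen_eq (n : Nat) (rs : List (List Int)) (hne : rs ≠ [])
    (hall : ∀ x ∈ rs, x.length = n) : pyZipLen rs = n := by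
  cases rs with
  | nil => exact absurd rfl hne
  | cons x t =>
      exact pyZipLen_const n t (fun y hy => hall y (by simp [hy])) _ (hall x (by simp))

theorem unshiftMatrix_equiv (matrix : List (List Int)) (hpre : Pre_unshiftMatrix matrix) :
    unshiftMatrix matrix = unshiftMatrix_alt matrix := by
  obtain ⟨hne, hrows⟩ := hpre
  have h0 : PySem.List.pyGet? matrix 0 = some (matrix.headD []) := by
    cases matrix with
    | nil => exact absurd rfl hne
    | cons a t => simp
  rw [A_norm matrix hne]
  simp only [unshiftMatrix_alt, h0, Option.getD_some]
  have hall : ∀ x ∈ (PySem.List.enumerate matrix).map (rotRow ((matrix.headD []).length : Int)),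
      x.length = (matrix.headD []).length := by
    intro x hx
    simp only [List.mem_map] at hx
    obtain ⟨p, hp, rfl⟩ := hx
    rcases (PySem.List.mem_enumerate_iff _ _ _).1 hp with ⟨k, hk, rfl⟩
    exact rotRow_length _ _ (hrows _ (List.getElem_mem hk))
  have hzip : pyZipLen ((PySem.List.enumerate matrix).map (rotRow ((matrix.headD []).length : Int)))
      = (matrix.headD []).length := by
    refine pyZipLen_eq _ _ ?_ hall
    cases matrix with
    | nil => exact absurd rfl hne
    | cons a t => simp [PySem.List.enumerate]
  rw [hzip]
  refine List.map_congr_left (fun c hc => ?_)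
  have hcn : c < (matrix.headD []).length := List.mem_range.1 hc
  have hnpos : 0 < (matrix.headD []).length := by omega
  apply List.ext_getElem
  · simp [PySem.List.length_enumerate]
  intro r hr1 hr2
  have hr : r < matrix.length := by simpa using hr1
  have hmem : matrix[r] ∈ matrix := List.getElem_mem hr
  have hrl : (matrix.headD []).length ≤ matrix[r].length := hrows _ hmem
  set n := (matrix.headD []).length with hn
  have h0n : ((n : Int)) ≠ 0 := by omega
  simp only [List.getElem_map, List.getElem_range, PySem.List.getElem_enumerate, zero_add]
  rw [rotRow_eq _ _ _ hnpos]
  set kn := ((-(r : Int)) % (n : Int)).toNat with hkn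
  have hknlt : kn < n := by
    have h1 := Int.emod_lt_of_pos (-(r : Int)) (show (0 : Int) < (n : Int) by omega)
    have h2 := Int.emod_nonneg (-(r : Int)) h0n
    omega
  have htl : (matrix[r].take n).length = n := by simp; omega
  rw [rot_getD _ _ _ (by rw [htl]; omega) (by rw [htl]; omega), htl]
  have hjn : (c + kn) % n < n := Nat.mod_lt _ hnpos
  have hjnn : 0 ≤ ((c : Int) - (r : Int)) % (n : Int) := Int.emod_nonneg _ h0n
  have hmod : PySem.Int.mod ((c : Int) - (r : Int)) (n : Int)
      = ((c : Int) - (r : Int)) % (n : Int) := PySem.Int.mod_eq_emod_of_pos (by omega)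
  have hcast : ((c : Int) - (r : Int)) % (n : Int)
      = (((((c : Int) - (r : Int)) % (n : Int)).toNat : Nat) : Int) :=
    (Int.toNat_of_nonneg hjnn).symm
  rw [show matrix.getD r [] = matrix[r] from List.getD_eq_getElem _ _ hr]
  rw [hmod, hcast, PySem.List.pyGetD_natCast]
  set j := ((((c : Int) - (r : Int)) % (n : Int)).toNat : Nat) with hj
  have hB : (List.take n matrix[r]).getD ((c + kn) % n) 0 = matrix[r].getD ((c + kn) % n) 0 := by
    rw [List.getD_eq_getElem?_getD, List.getElem?_take_of_lt hjn, ← List.getD_eq_getElem?_getD]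
  rw [hB]
  congr 1
  -- j = (c + kn) % n : both residues of c - r modulo n
  have e1 : ((kn : Int)) = (-(r : Int)) % (n : Int) := Int.toNat_of_nonneg (Int.emod_nonneg _ h0n)
  have e2 : ((j : Int)) = ((c : Int) - (r : Int)) % (n : Int) := Int.toNat_of_nonneg hjnn
  have e3 : (((c + kn) % n : Nat) : Int) = ((c : Int) + (kn : Int)) % (n : Int) := by push_cast; rfl
  have e4 : ((c : Int) + ((-(r : Int)) % (n : Int))) % (n : Int)
      = ((c : Int) - (r : Int)) % (n : Int) := by
    conv_lhs => rw [Int.add_emod, Int.emod_emod_of_dvd _ dvd_rfl, ← Int.add_emod]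
    rw [← sub_eq_add_neg]
  have e5 : ((j : Int)) = (((c + kn) % n : Nat) : Int) := by
    rw [e2, e3, e1]
    exact e4.symm
  omega

-- ===== VERDICT (by name: the statement is the Claim_ definition above) =====
theorem unshiftMatrix_spec : Claim_equal_unshiftMatrix := by
  intro matrix _ hpre
  unfold Spec_unshiftMatrix
  exact unshiftMatrix_equiv matrix hpre
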